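-- pv_equiv track=rewrite | github.com/TechInTech/Interview_Codes | 滴滴/01.py | order_by
-- ===== SOURCE A (Python) =====
-- def order_by(left):
--     if '/' not in left:
--         while '+' in left:
--             left.remove('+')
--         left.sort()
--         length = len(left)
--         ss = ['+'] * (2*length)
--         for i in range(length):
--             ss[2*i] = left[i]
--         return ss
--     else:
--         index_ = left.index('/')
--         sub_left = order_by(left[0:index_-1])
--         sub_right = order_by(left[index_+2::])
--         ss = sub_left + left[index_-1:index_+2] + sub_right
--         return ss
-- ===== SOURCE B (Python) =====
-- # Explicit-stack re-implementation: A's right-linear recursion is replaced by a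
-- # work stack of ('seg', ...)/('lit', ...) items drained into one output
-- # accumulator; each segment is rendered by filter+sorted+pair-append instead of
-- # A's repeated in-place remove('+') passes and index assignments into a
-- # preallocated list.  Equivalence is about the return value only: Python A
-- # mutates its argument in place in the no-'/' case, B does not.
--
-- def order_by(left):
--     out = []
--     stack = [('seg', list(left))]
--     while stack:
--         kind, val = stack.pop()
--         if kind == 'lit':
--             out += val
--         elif '/' not in val:
--             for t in sorted(x for x in val if x != '+'):
--                 out += [t, '+']
--         else:
--             i = val.index('/')
--             stack.append(('seg', val[i + 2:]))
--             stack.append(('lit', val[i - 1:i + 2]))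
--             stack.append(('seg', val[0:i - 1]))
--     return out
-- ===== Notes on version B (the rewrite author's own statement) =====
-- stated objective: alternative
-- what changed: A's right-linear recursion over the first '/' is replaced by an iterative work-stack machine draining segment/literal items into a single output accumulator, and each '/'-free segment is rendered by filter+sorted+pair-append instead of A's repeated in-place remove('+') passes and index assignments into a preallocated list.
import Mathlib
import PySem

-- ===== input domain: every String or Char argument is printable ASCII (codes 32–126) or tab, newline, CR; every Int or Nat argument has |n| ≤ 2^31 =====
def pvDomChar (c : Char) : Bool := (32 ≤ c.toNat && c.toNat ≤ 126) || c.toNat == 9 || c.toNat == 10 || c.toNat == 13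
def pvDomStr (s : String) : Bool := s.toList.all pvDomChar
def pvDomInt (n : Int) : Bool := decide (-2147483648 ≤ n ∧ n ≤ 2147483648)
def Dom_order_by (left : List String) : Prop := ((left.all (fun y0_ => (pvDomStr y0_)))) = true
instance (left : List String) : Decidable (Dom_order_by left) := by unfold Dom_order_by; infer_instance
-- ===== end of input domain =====

-- B replaces A's right-linear recursion by an explicit work-stack loop with one
-- output accumulator; equivalence is about the return value only (Python A
-- mutates its argument in place in the no-'/' case, B does not).

-- facts cited by the ports' decreasing_by: both slices of a list containing "/" are shorter
theorem index_getD_lt {l : List String} (h : ("/" : String) ∈ l) :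
    (PySem.List.index? l "/").getD 0 < l.length := by
  obtain ⟨k, hk⟩ := Option.isSome_iff_exists.mp ((PySem.List.index?_isSome_iff l "/").mpr h)
  obtain ⟨hk2, -, -⟩ := PySem.List.getElem_of_index?_eq_some hk
  rw [hk]; simpa using hk2

theorem len_slice_left (l : List String) (i : Nat) (hpos : 0 < l.length) (hi : i < l.length) :
    (PySem.List.slice l (some 0) (some ((i : Int) - 1))).length < l.length := by
  rw [PySem.List.slice_zero_start]
  rcases Nat.eq_zero_or_pos i with h0 | hp
  · rw [h0]
    norm_num [PySem.List.slice_to_neg_one]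
    omega
  · have : ((i : Int) - 1) = (((i - 1 : Nat)) : Int) := by omega
    rw [this, PySem.List.slice_to_natCast, List.length_take]
    omega

theorem len_slice_right (l : List String) (i : Nat) (hpos : 0 < l.length) :
    (PySem.List.slice l (some ((i : Int) + 2)) none).length < l.length := by
  rw [PySem.List.slice_from l (by positivity), List.length_drop]
  have : (((i : Nat) : Int) + 2).toNat = i + 2 := by omega
  omega

-- ===== PORT A =====

-- while '+' in left: left.remove('+')
def removePlus (l : List String) : List String :=
  if _h : ("+" : String) ∈ l then
    removePlus ((PySem.List.remove? l "+").getD l)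
  else l
termination_by l.length
decreasing_by
  rw [PySem.List.remove?_eq_some_erase l "+" _h, Option.getD_some]
  have := List.length_pos_of_mem _h
  rw [List.length_erase_of_mem _h]
  omega

def order_by (left : List String) : List String :=
  if h : ("/" : String) ∉ left then
    -- '+'-removal loop, in-place sort, then ss = ['+']*(2*length) with ss[2*i] = left[i]
    let left1 := removePlus left
    let left2 := PySem.List.sorted left1 (fun x => x) false
    let length : Nat := left2.length
    (PySem.List.pyRange 0 (length : Int) 1).foldl
      (fun ss i => PySem.List.pySetD ss (2 * i) (PySem.List.pyGetD left2 i ""))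
      (PySem.List.pyRepeat ["+"] (2 * (length : Int)))
  else
    let index_ : Nat := (PySem.List.index? left "/").getD 0
    let sub_left := order_by (PySem.List.slice left (some 0) (some ((index_ : Int) - 1)))
    let sub_right := order_by (PySem.List.slice left (some ((index_ : Int) + 2)) none)
    sub_left ++ PySem.List.slice left (some ((index_ : Int) - 1)) (some ((index_ : Int) + 2)) ++ sub_right
termination_by left.length
decreasing_by
  · exact len_slice_left left _ (List.length_pos_of_mem (not_not.mp h))
      (index_getD_lt (not_not.mp h))
  · exact len_slice_right left _ (List.length_pos_of_mem (not_not.mp h))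

-- ===== PORT B =====

-- stack-item weight, used only for the termination measure of runStack
def itemWeight (it : String × List String) : Nat :=
  if it.1 == "lit" then 1 else 4 ^ it.2.length

theorem itemWeight_pos (it : String × List String) : 0 < itemWeight it := by
  unfold itemWeight
  split
  · omega
  · exact Nat.pow_pos (by omega)

theorem push_weight_lt {a b n : Nat} (ha : a < n) (hb : b < n) :
    4 ^ a + (1 + (4 ^ b + 0)) < 4 ^ n := by
  have h1 : 4 ^ a ≤ 4 ^ (n - 1) := Nat.pow_le_pow_right (by omega) (by omega)
  have h2 : 4 ^ b ≤ 4 ^ (n - 1) := Nat.pow_le_pow_right (by omega) (by omega)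
  have h3 : 4 ^ n = 4 * 4 ^ (n - 1) := by
    rw [← pow_succ']
    congr 1
    omega
  have h4 : 0 < 4 ^ (n - 1) := Nat.pow_pos (by omega)
  omega

-- the 'while stack' loop: stack top at the list head (Python appends/pops at the end)
def runStack (out : List String) (stack : List (String × List String)) : List String :=
  match stack with
  | [] => out
  | (kind, val) :: st =>
    if kind == "lit" then runStack (out ++ val) st
    else if h : ("/" : String) ∉ val then
      runStack ((PySem.List.sorted (val.filter (fun x => x != "+")) (fun x => x) false).foldl
        (fun o t => o ++ [t, "+"]) out) st
    else
      let i : Nat := (PySem.List.index? val "/").getD 0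
      runStack out (("seg", PySem.List.slice val (some 0) (some ((i : Int) - 1)))
        :: ("lit", PySem.List.slice val (some ((i : Int) - 1)) (some ((i : Int) + 2)))
        :: ("seg", PySem.List.slice val (some ((i : Int) + 2)) none) :: st)
termination_by (stack.map itemWeight).sum
decreasing_by
  · have := itemWeight_pos (kind, val)
    simp only [List.map_cons, List.sum_cons]
    omega
  · have := itemWeight_pos (kind, val)
    simp only [List.map_cons, List.sum_cons]
    omega
  · simp only [List.map_cons, List.sum_cons]
    have hmem : ("/" : String) ∈ val := not_not.mp h
    have hpos : 0 < val.length := List.length_pos_of_mem hmem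
    have h1 := len_slice_left val ((PySem.List.index? val "/").getD 0) hpos (index_getD_lt hmem)
    have h2 := len_slice_right val ((PySem.List.index? val "/").getD 0) hpos
    have hw : itemWeight (kind, val) = 4 ^ val.length := by
      unfold itemWeight
      rw [if_neg (by assumption)]
    rw [hw]
    simp only [show ∀ X : List String, itemWeight ("seg", X) = 4 ^ X.length from fun _ => rfl,
               show ∀ X : List String, itemWeight ("lit", X) = 1 from fun _ => rfl]
    have := push_weight_lt h1 h2
    omega

def order_by_alt (left : List String) : List String := runStack [] [("seg", left)]

-- ===== PRECONDITION & SPEC =====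
def Spec_order_by (left : List String) (out : List String) : Prop := out = order_by_alt left
instance (left : List String) (out : List String) : Decidable (Spec_order_by left out) := by
  unfold Spec_order_by; infer_instance

-- ===== CLAIM (what is proved, stated in full; the proofs are below) =====
def Claim_equal_order_by : Prop := ∀ (left : List String), Dom_order_by left → Spec_order_by left (order_by left)

-- ===== LEMMAS AND PROOFS =====

theorem filter_erase_plus (l : List String) (h : ("+" : String) ∈ l) :
    (l.erase "+").filter (fun x => x != "+") = l.filter (fun x => x != "+") := by
  induction l with
  | nil => cases h
  | cons a t ih =>
    by_cases ha : a = "+"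
    · subst ha; simp [List.erase_cons_head]
    · rw [List.erase_cons_tail (by simpa using ha)]
      have ht : ("+" : String) ∈ t := by
        rcases List.mem_cons.mp h with h1 | h1
        · exact absurd h1.symm ha
        · exact h1
      simp [List.filter_cons, ih ht]

theorem removePlus_eq_filter (l : List String) :
    removePlus l = l.filter (fun x => x != "+") := by
  rw [removePlus]
  split
  · next h =>
    rw [PySem.List.remove?_eq_some_erase l "+" h, Option.getD_some,
        removePlus_eq_filter (l.erase "+"), filter_erase_plus l h]
  · next h =>
    exact (List.filter_eq_self.mpr (fun a ha => by
      simp only [bne_iff_ne, ne_eq]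
      exact fun he => h (he ▸ ha))).symm
termination_by l.length
decreasing_by
  rename_i h
  have := List.length_pos_of_mem h
  rw [List.length_erase_of_mem h]; omega

theorem setfold_append (r : List Int) (m X Y : List String)
    (h : ∀ i ∈ r, 0 ≤ i ∧ 2 * i < (X.length : Int)) :
    r.foldl (fun ss i => PySem.List.pySetD ss (2 * i) (PySem.List.pyGetD m i "")) (X ++ Y)
      = (r.foldl (fun ss i => PySem.List.pySetD ss (2 * i) (PySem.List.pyGetD m i "")) X) ++ Y := by
  induction r generalizing X with
  | nil => rfl
  | cons i r ih =>
    obtain ⟨h0, hlt⟩ := h i List.mem_cons_self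
    have h20 : (0:Int) ≤ 2 * i := by omega
    simp only [List.foldl_cons]
    rw [PySem.List.pySetD_of_nonneg _ _ h20, PySem.List.pySetD_of_nonneg _ _ h20,
        List.set_append, if_pos (by omega)]
    rw [ih (X.set (2*i).toNat _) (fun j hj => by
      have := h j (List.mem_cons_of_mem _ hj); simpa using this)]

theorem build_eq (m : List String) :
    (PySem.List.pyRange 0 (m.length : Int) 1).foldl
      (fun ss i => PySem.List.pySetD ss (2 * i) (PySem.List.pyGetD m i ""))
      (PySem.List.pyRepeat ["+"] (2 * (m.length : Int)))
    = m.flatMap (fun t => [t, "+"]) := by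
  induction m using List.reverseRecOn with
  | nil => simp [PySem.List.pyRange_one_eq_nil le_rfl, PySem.List.pyRepeat_singleton]
  | append_singleton t x ih =>
    have hn : ((t ++ [x]).length : Int) = (t.length : Int) + 1 := by simp
    rw [hn, PySem.List.pyRange_one_succ_right (by positivity), List.foldl_append,
        PySem.List.pyRepeat_singleton]
    have hrep : ((2 * ((t.length : Int) + 1)).toNat) = 2 * t.length + 2 := by omega
    rw [hrep, List.replicate_add]
    have hcongr : (PySem.List.pyRange 0 (t.length : Int) 1).foldl
        (fun ss i => PySem.List.pySetD ss (2 * i) (PySem.List.pyGetD (t ++ [x]) i ""))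
        (List.replicate (2 * t.length) "+" ++ List.replicate 2 "+")
      = (PySem.List.pyRange 0 (t.length : Int) 1).foldl
        (fun ss i => PySem.List.pySetD ss (2 * i) (PySem.List.pyGetD t i ""))
        (List.replicate (2 * t.length) "+" ++ List.replicate 2 "+") := by
      apply PySem.List.foldl_congr_mem
      intro acc i hi
      obtain ⟨hi0, hi1⟩ := PySem.List.mem_pyRange_one.mp hi
      have hlen : i < ((t ++ [x]).length : Int) := by simp; omega
      rw [PySem.List.pyGetD_eq_getElem _ _ hi0 hlen, PySem.List.pyGetD_eq_getElem _ _ hi0 (by omega),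
          List.getElem_append_left (by omega)]
    rw [List.foldl_cons, List.foldl_nil, hcongr,
        setfold_append _ t (List.replicate (2 * t.length) "+") (List.replicate 2 "+")
          (fun i hi => by
            obtain ⟨hi0, hi1⟩ := PySem.List.mem_pyRange_one.mp hi
            constructor
            · exact hi0
            · simp [List.length_replicate]; omega)]
    have ihx : (PySem.List.pyRange 0 (t.length : Int) 1).foldl
        (fun ss i => PySem.List.pySetD ss (2 * i) (PySem.List.pyGetD t i ""))
        (List.replicate (2 * t.length) "+") = t.flatMap (fun s => [s, "+"]) := by
      have := ih
      rwa [PySem.List.pyRepeat_singleton, show ((2 * (t.length : Int)).toNat) = 2 * t.length by omega] at this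
    rw [ihx]
    have hget : PySem.List.pyGetD (t ++ [x]) (t.length : Int) "" = x := by
      rw [PySem.List.pyGetD_eq_getElem _ _ (by positivity) (by simp)]
      simp
    rw [hget]
    have h2n : (2 * (t.length : Int)) = ((2 * t.length : Nat) : Int) := by omega
    rw [h2n, PySem.List.pySetD_natCast, List.set_append,
        if_neg (by simp [List.length_flatMap]; omega)]
    have hfl : (t.flatMap (fun s => [s, "+"])).length = 2 * t.length := by
      simp [List.length_flatMap]
      induction t with
      | nil => rfl
      | cons a t iht => simp; omega
    rw [hfl]
    simp [List.flatMap_append]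

theorem order_by_base (l : List String) (h : ("/" : String) ∉ l) :
    order_by l = (PySem.List.sorted (l.filter (fun x => x != "+")) (fun x => x) false).flatMap
      (fun t => [t, "+"]) := by
  rw [order_by.eq_def, dif_pos h, removePlus_eq_filter, build_eq]

theorem runStack_lit (out v : List String) (st : List (String × List String)) :
    runStack out (("lit", v) :: st) = runStack (out ++ v) st := by
  rw [runStack]
  simp

theorem runStack_seg (n : Nat) :
    ∀ (l out : List String) (st : List (String × List String)), l.length ≤ n →
      runStack out (("seg", l) :: st) = runStack (out ++ order_by l) st := by
  induction n with
  | zero =>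
    intro l out st hlen
    have : l = [] := List.length_eq_zero_iff.mp (Nat.le_zero.mp hlen)
    subst this
    rw [runStack, if_neg (by decide), dif_pos (by simp), PySem.List.foldl_append_eq_flatMap,
        order_by_base _ (by simp)]
  | succ n ih =>
    intro l out st hlen
    by_cases hmem : ("/" : String) ∈ l
    · have hpos : 0 < l.length := List.length_pos_of_mem hmem
      have h1 := len_slice_left l ((PySem.List.index? l "/").getD 0) hpos (index_getD_lt hmem)
      have h2 := len_slice_right l ((PySem.List.index? l "/").getD 0) hpos
      have hOB : order_by l
          = order_by (PySem.List.slice l (some 0)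
              (some ((((PySem.List.index? l "/").getD 0 : Nat) : Int) - 1)))
            ++ PySem.List.slice l (some ((((PySem.List.index? l "/").getD 0 : Nat) : Int) - 1))
                (some ((((PySem.List.index? l "/").getD 0 : Nat) : Int) + 2))
            ++ order_by (PySem.List.slice l
                (some ((((PySem.List.index? l "/").getD 0 : Nat) : Int) + 2)) none) := by
        rw [order_by.eq_def, dif_neg (not_not.mpr hmem)]
      rw [runStack, if_neg (by decide), dif_neg (not_not.mpr hmem)]
      rw [ih _ out _ (by omega), runStack_lit, ih _ _ st (by omega), hOB]
      simp [List.append_assoc]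
    · rw [runStack, if_neg (by decide), dif_pos hmem, PySem.List.foldl_append_eq_flatMap,
          order_by_base _ hmem]

-- ===== VERDICT (by name: the statement is the Claim_ definition above) =====
theorem order_by_spec : Claim_equal_order_by := by
  intro l _
  show order_by l = order_by_alt l
  rw [order_by_alt, runStack_seg l.length l [] [] le_rfl, runStack, List.nil_append]
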